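-- pv_equiv track=rewrite | github.com/GenuinelyAref/Programming_Assessment | 08_Text_Enhancer.py | decorate_print
-- ===== SOURCE A (Python) =====
-- def decorate_print(text, char, style):
--     # Define used variables
--     output = ""
--     string = ""
--     current_index = 0
--     split_text = []
--     new_line_index = []
--
--     # Set generic variable values (used in various parts around the function) - really handy, to minimise repeated code
--     length = len(text) + 6
--     main_line = "{} {} {}".format(2*char, text, 2*char)
--
--     # Type 1 of function: inserts decorative characters on either side of string
--     if style == 1:
--         output = main_line
--
--     # Type 2 of function: type 1 + 'sandwiching' lines of the decorative character above and below the string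
--     elif style == 2:
--         output = "{}\n{}\n{}".format(length*char, main_line, length*char)
--
--     # Type 3 of function: type 2, but edited to accommodate for \n (line breaks) and centre aligns text on each line
--     elif style == 3:
--         # Number of \n escape-code characters
--         new_lines = text.count("\n")
--         # Take indexes of all the \n characters and store them in a list (new_line_index)
--         for i in range(0, new_lines):
--             if i == 0:
--                 current_index = text.index("\n")
--                 new_line_index.append(current_index)
--             else:
--                 new_line_index.append(text.index("\n", current_index+1))
--                 current_index = new_line_index[i]
--
--         # Take apart parts of string between all the \n, and store each new string as part of a list (split_text), each
--         #   to be printed on separate lines in the output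
--
--         # Set range of indexes for each run of collecting strings between two '\n's or between one and the end/beginning
--         for item in range(0, new_lines+1):
--             if item == 0:
--                 low = 0
--                 high = new_line_index[0]
--             elif item == new_lines:
--                 low = new_line_index[item-1] + 1
--                 high = len(text)
--             else:
--                 low = new_line_index[item-1] + 1
--                 high = new_line_index[item]
--
--             # Collect characters, between indexes set above, and store as one string in a list (split_text)
--             for thing in range(low, high):
--                 string += text[thing]
--             split_text.append(string)
--             # Reset variable for each group of characters 'extracted' from original string
--             string = ""
--
--         # Find longest item in list (split_text), as in the string with most characters
--         max_item = max(split_text, key=len)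
--         # Set the output line for the string with most characters (above)
--         max_char_line = "{} {} {}".format(2*char, max_item, 2*char)
--         # Length of above output line (used extensively later)
--         total_length = len(max_char_line)
--
--         # Top line of decoration
--         output += "{}\n".format(total_length*char)
--
--         # Start assembling final output
--         for something in range(0, len(split_text)):
--             # Avoid re-printing the line that's already been made ready for output above
--             if split_text[something] != max_item:
--                 word = split_text[something]
--                 # The amount of spacing to put around the string (excluding the normal single space on either side)
--                 total_spacing = total_length - 6 - len(word)
--
--                 # If number of space characters is even, then put half the spaces on each side of string and add 'char'
--                 if total_spacing % 2 == 0: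
--                     spaces = int(total_spacing/2)
--                     line = "{} {}{}{} {}".format(2*char, " "*spaces, word, " "*spaces, 2*char)
--                 # If number of space characters is odd, put the extra space on the left side of the string & add 'char'
--                 else:
--                     space = int((total_spacing+1)/2)
--                     space2 = space - 1
--                     line = "{} {}{}{} {}".format(2*char, " "*space, word, " "*space2, 2*char)
--                 # Add each line to final output variable
--                 output += "{}\n".format(line)
--             else:
--                 # Add the longest-string output line to the final output variable
--                 output += "{}\n".format(max_char_line)
--
--         # Bottom line of decoration
--         output += total_length*char
--
--     # After all these hard and tedious, 5+ hours of planning, flow-charting, debugging, crying and typing the code,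
--     #  print the beautiful outcome, that will HOPEFULLY  work as expected :))
--     return output
-- ===== SOURCE B (Python) =====
-- def decorate_print(text, char, style):
--     side = 2 * char
--     if style == 1:
--         return "{} {} {}".format(side, text, side)
--     if style == 2:
--         bar = (len(text) + 6) * char
--         return "{}\n{}\n{}".format(bar, "{} {} {}".format(side, text, side), bar)
--     if style == 3:
--         lines = text.split("\n")
--         max_item = max(lines, key=len)
--         total_length = 2 * len(side) + len(max_item) + 2
--         bar = total_length * char
--         body = []
--         for w in lines:
--             if w == max_item:
--                 body.append("{} {} {}".format(side, w, side))
--             else: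
--                 pad = total_length - 6 - len(w)
--                 body.append("{} {}{}{} {}".format(side, " " * ((pad + 1) // 2), w, " " * (pad // 2), side))
--         return "{}\n{}\n{}".format(bar, "\n".join(body), bar)
--     return ""
-- ===== Notes on version B (the rewrite author's own statement) =====
-- stated objective: simpler
-- what changed: Style 3 drops A's newline-index-finding pass and char-by-char extraction loops in favour of text.split('\n'), max(lines, key=len) and a single formatting pass with a (pad+1)//2 / pad//2 centring formula replacing the even/odd branch.
import Mathlib
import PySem

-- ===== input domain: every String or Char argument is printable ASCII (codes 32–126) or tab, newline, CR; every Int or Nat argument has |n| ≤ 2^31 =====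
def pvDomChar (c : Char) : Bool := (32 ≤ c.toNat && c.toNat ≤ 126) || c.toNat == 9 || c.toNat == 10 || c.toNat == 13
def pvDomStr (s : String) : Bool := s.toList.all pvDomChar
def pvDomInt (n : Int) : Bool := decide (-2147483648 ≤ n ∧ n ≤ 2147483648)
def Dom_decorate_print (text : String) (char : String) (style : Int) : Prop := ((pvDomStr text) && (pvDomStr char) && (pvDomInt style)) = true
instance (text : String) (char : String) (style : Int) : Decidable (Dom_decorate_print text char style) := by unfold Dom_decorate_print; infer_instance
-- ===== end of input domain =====

-- B replaces A's style-3 newline-index scan and char-by-char extraction with split('\n'),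
-- max(key=len) and one centring formula (objective: simpler).


-- ===== PORT A =====
-- style-3 core of A on List Char (text[i] / new_line_index[i] are always in range where
-- Python returns, so pyGetD's defaults are never consulted inside Pre_)
def decoALoop1Body (cs : List Char) (s : Int × List Int) (i : Int) : Int × List Int :=
  if i = 0 then
    let c := PySem.Chars.find cs ['\n']
    (c, s.2 ++ [c])
  else
    let v := PySem.Chars.findFrom cs ['\n'] (s.1 + 1) none
    let idx' := s.2 ++ [v]
    (PySem.List.pyGetD idx' i 0, idx')

def decoALoop2Body (cs : List Char) (new_lines : Nat) (new_line_index : List Int)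
    (acc : List (List Char)) (item : Int) : List (List Char) :=
  let lh : Int × Int :=
    if item = 0 then (0, PySem.List.pyGetD new_line_index 0 0)
    else if item = (new_lines : Int) then
      (PySem.List.pyGetD new_line_index (item - 1) 0 + 1, PySem.Chars.len cs)
    else
      (PySem.List.pyGetD new_line_index (item - 1) 0 + 1, PySem.List.pyGetD new_line_index item 0)
  let string := (PySem.List.pyRange lh.1 lh.2 1).foldl
      (fun (st : List Char) thing => st ++ [PySem.List.pyGetD cs thing ' ']) []
  acc ++ [string]

def decoALoop3Body (split_text : List (List Char)) (max_item max_char_line ch : List Char)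
    (total_length : Int) (out : List Char) (something : Int) : List Char :=
  let word := PySem.List.pyGetD split_text something []
  if word ≠ max_item then
    let total_spacing := total_length - 6 - PySem.Chars.len word
    let line :=
      if PySem.Int.mod total_spacing 2 = 0 then
        let spaces := PySem.Int.truncdiv total_spacing 2
        PySem.List.pyRepeat ch 2 ++ ' ' :: PySem.List.pyRepeat [' '] spaces ++ word ++
          PySem.List.pyRepeat [' '] spaces ++ ' ' :: PySem.List.pyRepeat ch 2
      else
        let space := PySem.Int.truncdiv (total_spacing + 1) 2
        let space2 := space - 1
        PySem.List.pyRepeat ch 2 ++ ' ' :: PySem.List.pyRepeat [' '] space ++ word ++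
          PySem.List.pyRepeat [' '] space2 ++ ' ' :: PySem.List.pyRepeat ch 2
    out ++ line ++ ['\n']
  else out ++ max_char_line ++ ['\n']

def decoAStyle3 (cs ch : List Char) : List Char :=
  let new_lines : Nat := PySem.Chars.count cs ['\n']
  -- first loop: collect the indexes of all the '\n' characters
  let new_line_index := ((PySem.List.pyRange 0 (new_lines : Int) 1).foldl (decoALoop1Body cs) (0, [])).2
  -- second loop: extract the pieces between the newlines, char by char
  let split_text := (PySem.List.pyRange 0 ((new_lines : Int) + 1) 1).foldl
      (decoALoop2Body cs new_lines new_line_index) []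
  let max_item := (PySem.List.max? split_text (fun w => PySem.Chars.len w)).getD []
  let max_char_line := PySem.List.pyRepeat ch 2 ++ ' ' :: max_item ++ ' ' :: PySem.List.pyRepeat ch 2
  let total_length : Int := PySem.Chars.len max_char_line
  let top := PySem.List.pyRepeat ch total_length ++ ['\n']
  -- third loop: assemble the output
  let mid := (PySem.List.pyRange 0 ((split_text.length : Int)) 1).foldl
      (decoALoop3Body split_text max_item max_char_line ch total_length) top
  mid ++ PySem.List.pyRepeat ch total_length

def decorate_print (text : String) (char : String) (style : Int) : String :=
  let cs := text.toList
  let ch := char.toList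
  let main_line := PySem.List.pyRepeat ch 2 ++ ' ' :: cs ++ ' ' :: PySem.List.pyRepeat ch 2
  String.ofList <|
    if style = 1 then main_line
    else if style = 2 then
      PySem.List.pyRepeat ch (PySem.Chars.len cs + 6) ++ '\n' :: main_line ++ '\n' ::
        PySem.List.pyRepeat ch (PySem.Chars.len cs + 6)
    else if style = 3 then decoAStyle3 cs ch
    else []

-- ===== PORT B =====
def decoBLine (side w : List Char) (isMax : Bool) (total_length : Int) : List Char :=
  if isMax = true then side ++ ' ' :: w ++ ' ' :: side
  else
    let pad := total_length - 6 - PySem.Chars.len w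
    side ++ ' ' :: PySem.List.pyRepeat [' '] (PySem.Int.floordiv (pad + 1) 2) ++ w ++
      PySem.List.pyRepeat [' '] (PySem.Int.floordiv pad 2) ++ ' ' :: side

def decoBStyle3 (cs ch : List Char) : List Char :=
  let side := PySem.List.pyRepeat ch 2
  let lines := PySem.Chars.splitOn cs ['\n']
  -- max(lines, key=len); lines is never empty, so the .getD default is never consulted
  let max_item := (PySem.List.max? lines (fun w => PySem.Chars.len w)).getD []
  let total_length : Int := 2 * PySem.Chars.len side + PySem.Chars.len max_item + 2
  let bar := PySem.List.pyRepeat ch total_length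
  let body := lines.map (fun w => decoBLine side w (decide (w = max_item)) total_length)
  bar ++ '\n' :: PySem.Chars.join ['\n'] body ++ '\n' :: bar

def decorate_print_alt (text : String) (char : String) (style : Int) : String :=
  let cs := text.toList
  let ch := char.toList
  let side := PySem.List.pyRepeat ch 2
  String.ofList <|
    if style = 1 then side ++ ' ' :: cs ++ ' ' :: side
    else if style = 2 then
      let bar := PySem.List.pyRepeat ch (PySem.Chars.len cs + 6)
      bar ++ '\n' :: (side ++ ' ' :: cs ++ ' ' :: side) ++ '\n' :: bar
    else if style = 3 then decoBStyle3 cs ch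
    else []

-- ===== PRECONDITION & SPEC =====
-- Pre_ excludes exactly the inputs where A raises: style 3 with a newline-free text
-- (A then indexes the empty new_line_index list — IndexError).
def Pre_decorate_print (text : String) (char : String) (style : Int) : Prop :=
  style = 3 → '\n' ∈ text.toList
instance (text : String) (char : String) (style : Int) : Decidable (Pre_decorate_print text char style) := by unfold Pre_decorate_print; infer_instance

def pvWitness_decorate_print : String × String × Int := ("a\nbc", "*", 3)

def Spec_decorate_print (text : String) (char : String) (style : Int) (out : String) : Prop := out = decorate_print_alt text char style
instance (text : String) (char : String) (style : Int) (out : String) : Decidable (Spec_decorate_print text char style out) := by unfold Spec_decorate_print; infer_instance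

-- ===== CLAIM (what is proved, stated in full; the proofs are below) =====
def Claim_equal_decorate_print : Prop := ∀ (text : String) (char : String) (style : Int), Dom_decorate_print text char style → Pre_decorate_print text char style → Spec_decorate_print text char style (decorate_print text char style)

-- ===== LEMMAS AND PROOFS =====

def nlpos : List Char → List Nat
  | [] => []
  | c :: t => if c = '\n' then 0 :: (nlpos t).map (· + 1) else (nlpos t).map (· + 1)

lemma nlpos_length (cs : List Char) : (nlpos cs).length = cs.count '\n' := by
  induction cs with
  | nil => simp [nlpos]
  | cons c t ih => by_cases h : c = '\n' <;> simp [nlpos, h, ih]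

lemma countgo (l : List Char) : ∀ (f acc : Nat), l.length ≤ f →
    PySem.Chars.count.go ['\n'] f l acc = acc + l.count '\n' := by
  induction l with
  | nil => intro f acc _; cases f <;> simp [PySem.Chars.count.go]
  | cons c t ih =>
    intro f acc hf
    cases f with
    | zero => simp at hf
    | succ f =>
      rw [PySem.Chars.count.go]
      simp only [List.isPrefixOf, Bool.and_true]
      by_cases h : c = '\n'
      · subst h
        simp only [beq_self_eq_true, if_pos]
        simp only [List.length_singleton, List.drop_succ_cons, List.drop_zero]
        rw [ih f (acc+1) (by simpa using hf)]
        simp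
        omega
      · simp only [beq_iff_eq, if_neg (Ne.symm h)]
        rw [ih f acc (by simpa using hf)]
        simp [h]


lemma count_single (cs : List Char) : PySem.Chars.count cs ['\n'] = cs.count '\n' := by
  rw [PySem.Chars.count]
  simp [countgo cs cs.length 0 le_rfl]

lemma mem_nlpos (cs : List Char) (j : Nat) : j ∈ nlpos cs ↔ cs[j]? = some '\n' := by
  induction cs generalizing j with
  | nil => simp [nlpos]
  | cons c t ih =>
    by_cases h : c = '\n'
    · subst h
      cases j with
      | zero => simp [nlpos]
      | succ j => simp [nlpos, ih]
    · cases j with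
      | zero => simp [nlpos, h]
      | succ j => simp [nlpos, h, ih]

lemma nlpos_pairwise (cs : List Char) : (nlpos cs).Pairwise (· < ·) := by
  induction cs with
  | nil => simp [nlpos]
  | cons c t ih =>
    by_cases h : c = '\n'
    · simp only [nlpos, h]
      refine List.Pairwise.cons ?_ ?_
      · intro a ha; simp [List.mem_map] at ha; omega
      · rw [List.pairwise_map]; exact ih.imp (by omega)
    · simp only [nlpos, if_neg h]
      rw [List.pairwise_map]; exact ih.imp (by omega)

lemma findgo (l : List Char) : ∀ (k : Nat), PySem.Chars.find.go ['\n'] l k =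
    (match nlpos l with | [] => (-1 : Int) | j :: _ => (k + j : Int)) := by
  induction l with
  | nil => intro k; rw [PySem.Chars.find.go]; simp [nlpos]
  | cons c t ih =>
    intro k
    rw [PySem.Chars.find.go]
    simp only [List.isPrefixOf, Bool.and_true]
    by_cases h : c = '\n'
    · subst h; simp [nlpos]
    · simp only [beq_iff_eq, if_neg (Ne.symm h)]
      rw [ih (k+1)]
      by_cases ht : nlpos t = []
      · simp [nlpos, h, ht]
      · obtain ⟨j, js, hj⟩ := List.exists_cons_of_ne_nil ht
        simp [nlpos, h, hj]
        ring

lemma find_single (cs : List Char) : PySem.Chars.find cs ['\n'] =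
    (match nlpos cs with | [] => (-1 : Int) | j :: _ => (j : Int)) := by
  rw [PySem.Chars.find, findgo cs 0]
  cases nlpos cs <;> simp

lemma nlpos_drop (cs : List Char) : ∀ (k : Nat),
    nlpos (cs.drop k) = ((nlpos cs).filter (fun j => k ≤ j)).map (· - k) := by
  induction cs with
  | nil => intro k; simp [nlpos]
  | cons c t ih =>
    intro k
    cases k with
    | zero =>
      rw [List.drop_zero, List.filter_eq_self.mpr (by intro a _; simp)]
      simp
    | succ k =>
      simp only [List.drop_succ_cons, ih k]
      have hfil : ∀ (P : List Nat), ((P.map (· + 1)).filter (fun j => decide (k + 1 ≤ j))).map (· - (k+1))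
          = (P.filter (fun j => decide (k ≤ j))).map (· - k) := by
        intro P
        rw [List.filter_map, List.map_map]
        have : (fun j => decide (k + 1 ≤ j)) ∘ (fun (x : Nat) => x + 1) = fun j => decide (k ≤ j) := by
          funext j; simp
        rw [this]
        apply List.map_congr_left
        intro a _; simp
      by_cases h : c = '\n'
      · rw [show nlpos (c :: t) = 0 :: (nlpos t).map (· + 1) by simp [nlpos, h]]
        rw [List.filter_cons_of_neg (by simp), hfil]
      · simp only [nlpos, if_neg h]
        rw [hfil]

lemma findFrom_single (cs : List Char) (k : Nat) (hk : k ≤ cs.length) :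
    PySem.Chars.findFrom cs ['\n'] (k : Int) none =
      (match (nlpos cs).filter (fun j => k ≤ j) with | [] => (-1 : Int) | j :: _ => (j : Int)) := by
  rw [PySem.Chars.findFrom_natCast cs ['\n'] k hk, find_single, nlpos_drop]
  cases hfil : (nlpos cs).filter (fun j => k ≤ j) with
  | nil => simp
  | cons j js =>
    have hj : k ≤ j := by
      have : j ∈ (nlpos cs).filter (fun j => k ≤ j) := by rw [hfil]; exact List.mem_cons_self
      simpa using (List.mem_filter.mp this).2
    simp only [List.map_cons]
    have : ((j - k : Nat) : Int) ≠ -1 := by omega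
    rw [if_neg this, Nat.cast_sub hj]
    ring

lemma splitOngo (l : List Char) : ∀ (f : Nat) (cur : List Char) (acc : List (List Char)),
    l.length < f →
    PySem.Chars.splitOn.go ['\n'] f l cur acc =
      acc.reverse ++ List.modifyHead (cur.reverse ++ ·) (l.splitOn '\n') := by
  induction l with
  | nil =>
    intro f cur acc hf
    cases f with
    | zero => omega
    | succ f =>
      rw [PySem.Chars.splitOn.go]
      · simp [List.splitOn, List.splitOnP_nil]
      · omega
  | cons c t ih =>
    intro f cur acc hf
    cases f with
    | zero => omega
    | succ f =>
      rw [PySem.Chars.splitOn.go]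
      simp only [List.isPrefixOf, Bool.and_true]
      by_cases h : c = '\n'
      · subst h
        rw [if_pos (by simp)]
        simp only [List.length_singleton, List.drop_succ_cons, List.drop_zero]
        rw [ih f [] (cur.reverse :: acc) (by simpa using hf)]
        simp only [List.splitOn, List.splitOnP_cons, beq_self_eq_true, if_pos, List.reverse_cons,
          List.append_assoc, List.singleton_append, List.nil_append, List.reverse_nil]
        cases t.splitOnP (· == '\n') <;> simp
      · rw [if_neg (by simp [Ne.symm h])]
        rw [ih f (c :: cur) acc (by simpa using hf)]
        simp only [List.splitOn, List.splitOnP_cons]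
        cases hsp : t.splitOnP (· == '\n') with
        | nil => exact absurd hsp (List.splitOnP_ne_nil _ t)
        | cons p ps => simp [hsp, if_neg h]

lemma splitOn_single (cs : List Char) :
    PySem.Chars.splitOn cs ['\n'] = cs.splitOn '\n' := by
  rw [PySem.Chars.splitOn, splitOngo cs (cs.length + 1) [] [] (by omega)]
  cases hsp : List.splitOn '\n' cs <;> simp [hsp]

def segs (cs : List Char) : Nat → List Nat → List (List Char)
  | low, [] => [cs.drop low]
  | low, q :: qs => (cs.take q).drop low :: segs cs (q + 1) qs

lemma segs_shift (c : Char) (t : List Char) : ∀ (qs : List Nat) (low : Nat),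
    segs (c :: t) (low + 1) (qs.map (· + 1)) = segs t low qs := by
  intro qs
  induction qs with
  | nil => intro low; simp [segs]
  | cons q qs ih =>
    intro low
    simp only [List.map_cons, segs, List.take_succ_cons, List.drop_succ_cons]
    rw [ih (q + 1)]

lemma splitOn_eq_segs (cs : List Char) : cs.splitOn '\n' = segs cs 0 (nlpos cs) := by
  induction cs with
  | nil => simp [nlpos, segs, List.splitOn, List.splitOnP_nil]
  | cons c t ih =>
    by_cases h : c = '\n'
    · subst h
      rw [show nlpos ('\n' :: t) = 0 :: (nlpos t).map (· + 1) by simp [nlpos]]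
      simp only [segs, List.take_zero, List.drop_zero]
      rw [show (0:Nat) + 1 = 0 + 1 by rfl, segs_shift, ← ih]
      simp [List.splitOn, List.splitOnP_cons]
    · rw [show nlpos (c :: t) = (nlpos t).map (· + 1) by simp [nlpos, h]]
      have hsplit : (c :: t).splitOn '\n' = ((t.splitOn '\n').modifyHead (c :: ·)) := by
        simp [List.splitOn, List.splitOnP_cons, h]
      rw [hsplit, ih]
      cases hq : nlpos t with
      | nil => simp [segs]
      | cons q qs =>
        simp only [List.map_cons, segs, List.drop_zero, List.modifyHead_cons]
        rw [show (q:Nat) + 1 = q + 1 by rfl]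
        have : (c :: t).take (q + 1) = c :: t.take q := rfl
        rw [this, segs_shift]


lemma filter_eq_drop (Q : List Nat) (k m : Nat) (hm : m ≤ Q.length)
    (h1 : ∀ (i : Nat) (h : i < Q.length), i < m → Q[i] < k)
    (h2 : ∀ (i : Nat) (h : i < Q.length), m ≤ i → k ≤ Q[i]) :
    Q.filter (fun j => k ≤ j) = Q.drop m := by
  conv_lhs => rw [← List.take_append_drop m Q]
  rw [List.filter_append]
  rw [List.filter_eq_nil_iff.mpr ?_, List.filter_eq_self.mpr ?_, List.nil_append]
  · intro a ha
    obtain ⟨i, hi, hia⟩ := List.mem_iff_getElem.mp ha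
    rw [List.getElem_drop] at hia
    simp only [decide_eq_true_eq]
    subst hia
    exact h2 _ _ (by omega)
  · intro a ha
    obtain ⟨i, hi, hia⟩ := List.mem_iff_getElem.mp ha
    rw [List.getElem_take] at hia
    simp only [decide_eq_true_eq]
    subst hia
    have := h1 i (by simp at hi; omega) (by simp at hi; omega)
    omega

lemma nlpos_lt_length (cs : List Char) (j : Nat) (hj : j ∈ nlpos cs) : j < cs.length := by
  rw [mem_nlpos] at hj
  exact (List.getElem?_eq_some_iff.mp hj).1

lemma loop1_step (cs : List Char) (m : Nat) (h1 : 1 ≤ m) (hm : m < (nlpos cs).length) :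
    decoALoop1Body cs ((((nlpos cs).getD (m-1) 0 : Nat) : Int),
        ((nlpos cs).take m).map Int.ofNat) ((m : Nat) : Int)
      = ((((nlpos cs).getD m 0 : Nat) : Int), ((nlpos cs).take (m+1)).map Int.ofNat) := by
  set Q := nlpos cs with hQ
  have hg1 : Q.getD (m-1) 0 = Q[m-1]'(by omega) := List.getD_eq_getElem Q 0 (by omega)
  have hg2 : Q.getD m 0 = Q[m]'hm := List.getD_eq_getElem Q 0 hm
  unfold decoALoop1Body
  rw [if_neg (by omega)]
  dsimp only
  have hmem : Q[m-1]'(by omega) ∈ Q := List.getElem_mem _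
  have hlt : Q[m-1]'(by omega) < cs.length := nlpos_lt_length cs _ (hQ ▸ hmem)
  have hpair := nlpos_pairwise cs
  rw [← hQ] at hpair
  have hfind : PySem.Chars.findFrom cs ['\n'] (((Q.getD (m-1) 0 : Nat) : Int) + 1) none
      = ((Q[m]'hm : Nat) : Int) := by
    rw [hg1]
    have hcast : ((Q[m-1]'(by omega) : Nat) : Int) + 1 = ((Q[m-1]'(by omega) + 1 : Nat) : Int) := by
      push_cast; ring
    rw [hcast, findFrom_single cs _ (by omega)]
    have hfd : Q.filter (fun j => Q[m-1]'(by omega) + 1 ≤ j) = Q.drop m := by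
      apply filter_eq_drop Q _ m (by omega)
      · intro i hi him
        rcases Nat.lt_or_ge i (m-1) with hlt' | hge
        · have := (List.pairwise_iff_getElem.mp hpair) i (m-1) hi (by omega) hlt'
          omega
        · have : i = m - 1 := by omega
          subst this; omega
      · intro i hi him
        have := (List.pairwise_iff_getElem.mp hpair) (m-1) i (by omega) hi (by omega)
        omega
    rw [← hQ, hfd, List.drop_eq_getElem_cons hm]
  rw [hfind, Prod.mk.injEq]
  constructor
  · rw [PySem.List.pyGetD_natCast]
    rw [List.getD_eq_getElem?_getD, List.getElem?_append_right (by simp [Nat.min_eq_left (le_of_lt hm)])]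
    simp [hg2, Nat.min_eq_left (le_of_lt hm), List.getElem?_eq_getElem hm]
  · have htake : List.take (m+1) Q = List.take m Q ++ [Q[m]'hm] := by
      rw [List.take_add_one, List.getElem?_eq_getElem hm]
      simp
    rw [htake]
    simp only [List.map_append, List.map_cons, List.map_nil, Int.ofNat_eq_natCast]

lemma loop1_inv (cs : List Char) : ∀ (d m : Nat), 1 ≤ m → m + d = (nlpos cs).length →
    (PySem.List.pyRange ((m : Nat) : Int) (((nlpos cs).length : Nat) : Int) 1).foldl (decoALoop1Body cs)
      ((((nlpos cs).getD (m-1) 0 : Nat) : Int), ((nlpos cs).take m).map Int.ofNat)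
      = ((((nlpos cs).getD ((nlpos cs).length - 1) 0 : Nat) : Int),
          (nlpos cs).map Int.ofNat) := by
  intro d
  induction d with
  | zero =>
    intro m h1 hm
    rw [PySem.List.pyRange_one_eq_nil (by omega)]
    simp only [List.foldl_nil]
    have hm' : m = (nlpos cs).length := by omega
    subst hm'
    rw [List.take_of_length_le le_rfl]
  | succ d ih =>
    intro m h1 hm
    rw [PySem.List.pyRange_one_cons (by omega), List.foldl_cons]
    rw [loop1_step cs m h1 (by omega)]
    have hc : ((m : Nat) : Int) + 1 = (((m+1 : Nat) : Nat) : Int) := by push_cast; ring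
    rw [hc]
    have := ih (m+1) (by omega) (by omega)
    simpa using this

lemma loop1_result (cs : List Char) (h : nlpos cs ≠ []) :
    ((PySem.List.pyRange 0 (((nlpos cs).length : Nat) : Int) 1).foldl (decoALoop1Body cs) (0, [])).2
      = (nlpos cs).map Int.ofNat := by
  have hlen : 1 ≤ (nlpos cs).length := by
    cases hq : nlpos cs with
    | nil => exact absurd hq h
    | cons q qs => simp [hq]
  obtain ⟨q, qs, hq⟩ := List.exists_cons_of_ne_nil h
  rw [PySem.List.pyRange_one_cons (by omega), List.foldl_cons]
  have hstep0 : decoALoop1Body cs (0, []) 0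
      = ((((nlpos cs).getD 0 0 : Nat) : Int), ((nlpos cs).take 1).map Int.ofNat) := by
    unfold decoALoop1Body
    rw [if_pos rfl, find_single]
    simp [hq]
  rw [hstep0]
  have h01 : (0 : Int) + 1 = ((1 : Nat) : Int) := by norm_num
  rw [h01, loop1_inv cs ((nlpos cs).length - 1) 1 le_rfl (by omega)]

lemma extract_eq (cs : List Char) (l h : Nat) (hh : h ≤ cs.length) :
    (PySem.List.pyRange ((l : Nat) : Int) ((h : Nat) : Int) 1).foldl
      (fun (st : List Char) thing => st ++ [PySem.List.pyGetD cs thing ' ']) []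
      = (cs.take h).drop l := by
  rw [PySem.List.foldl_append_singleton_eq_map]
  have hlen : ((h : Nat) : Int) = ((cs.take h).length : Int) := by
    simp [List.length_take, Nat.min_eq_left hh]
  rw [hlen]
  have hcong : (PySem.List.pyRange ((l : Nat) : Int) (((cs.take h).length : Nat) : Int) 1).map
        (fun thing => PySem.List.pyGetD cs thing ' ')
      = (PySem.List.pyRange ((l : Nat) : Int) (((cs.take h).length : Nat) : Int) 1).map
        (fun thing => PySem.List.pyGetD (cs.take h) thing ' ') := by
    apply List.map_congr_left
    intro j hj
    rw [PySem.List.mem_pyRange_one] at hj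
    have hj0 : 0 ≤ j := le_trans (by positivity) hj.1
    have hjh : j.toNat < (cs.take h).length := by omega
    rw [PySem.List.pyGetD_eq_getElem _ _ hj0 (by omega),
        PySem.List.pyGetD_eq_getElem _ _ hj0 (by omega)]
    exact (List.getElem_take).symm
  rw [hcong, PySem.List.map_pyGetD_pyRange' (cs.take h) ' ' (by positivity)]
  simp

lemma getD_map_ofNat (Q : List Nat) (k : Nat) (d : Int) (hk : k < Q.length) :
    (Q.map Int.ofNat).getD k d = Int.ofNat (Q.getD k 0) := by
  rw [List.getD_eq_getElem?_getD, List.getD_eq_getElem?_getD,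
      List.getElem?_map, List.getElem?_eq_getElem hk]
  simp

lemma loop2_inv (cs : List Char) : ∀ (d m : Nat) (acc : List (List Char)), 1 ≤ m →
    m + d = (nlpos cs).length →
    (PySem.List.pyRange ((m : Nat) : Int) ((((nlpos cs).length : Nat) : Int) + 1) 1).foldl
      (decoALoop2Body cs (nlpos cs).length ((nlpos cs).map Int.ofNat)) acc
      = acc ++ segs cs ((nlpos cs).getD (m-1) 0 + 1) ((nlpos cs).drop m) := by
  intro d
  induction d with
  | zero =>
    intro m acc h1 hm
    have hm' : m = (nlpos cs).length := by omega
    subst hm'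
    rw [show ((((nlpos cs).length : Nat) : Int) + 1) = (((nlpos cs).length : Nat) : Int) + 1 from rfl,
        PySem.List.pyRange_one_singleton, List.foldl_cons, List.foldl_nil]
    unfold decoALoop2Body
    rw [if_neg (by omega), if_pos rfl]
    dsimp only
    have hq : (nlpos cs).getD ((nlpos cs).length - 1) 0 < cs.length := by
      apply nlpos_lt_length cs
      rw [List.getD_eq_getElem _ _ (by omega)]
      exact List.getElem_mem _
    have hgd : PySem.List.pyGetD ((nlpos cs).map Int.ofNat)
        ((((nlpos cs).length : Nat) : Int) - 1) 0
        = Int.ofNat ((nlpos cs).getD ((nlpos cs).length - 1) 0) := by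
      rw [show ((((nlpos cs).length : Nat) : Int) - 1) = (((nlpos cs).length - 1 : Nat) : Int) by omega,
          PySem.List.pyGetD_natCast, getD_map_ofNat _ _ _ (by omega)]
    rw [hgd]
    have hcast : Int.ofNat ((nlpos cs).getD ((nlpos cs).length - 1) 0) + 1
        = (((nlpos cs).getD ((nlpos cs).length - 1) 0 + 1 : Nat) : Int) := by
      simp
    rw [hcast, show PySem.Chars.len cs = ((cs.length : Nat) : Int) by simp [PySem.Chars.len],
        extract_eq cs _ _ le_rfl, List.take_length]
    rw [List.drop_of_length_le le_rfl]
    simp [segs]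
  | succ d ih =>
    intro m acc h1 hm
    rw [PySem.List.pyRange_one_cons (by omega), List.foldl_cons]
    have hstep : decoALoop2Body cs (nlpos cs).length ((nlpos cs).map Int.ofNat) acc ((m : Nat) : Int)
        = acc ++ [(cs.take ((nlpos cs).getD m 0)).drop ((nlpos cs).getD (m-1) 0 + 1)] := by
      unfold decoALoop2Body
      rw [if_neg (by omega), if_neg (by omega)]
      dsimp only
      have hgd1 : PySem.List.pyGetD ((nlpos cs).map Int.ofNat) (((m : Nat) : Int) - 1) 0
          = Int.ofNat ((nlpos cs).getD (m-1) 0) := by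
        rw [show (((m : Nat) : Int) - 1) = (((m - 1 : Nat) : Nat) : Int) by omega,
            PySem.List.pyGetD_natCast, getD_map_ofNat _ _ _ (by omega)]
      have hgd2 : PySem.List.pyGetD ((nlpos cs).map Int.ofNat) ((m : Nat) : Int) 0
          = Int.ofNat ((nlpos cs).getD m 0) := by
        rw [PySem.List.pyGetD_natCast, getD_map_ofNat _ _ _ (by omega)]
      rw [hgd1, hgd2]
      have hcast : Int.ofNat ((nlpos cs).getD (m-1) 0) + 1
          = (((nlpos cs).getD (m-1) 0 + 1 : Nat) : Int) := by simp
      have hqm : (nlpos cs).getD m 0 < cs.length := by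
        apply nlpos_lt_length cs
        rw [List.getD_eq_getElem _ _ (by omega)]
        exact List.getElem_mem _
      rw [hcast, show Int.ofNat ((nlpos cs).getD m 0) = (((nlpos cs).getD m 0 : Nat) : Int) by simp,
          extract_eq cs _ _ (le_of_lt hqm)]
    rw [hstep]
    rw [show ((m : Nat) : Int) + 1 = (((m + 1 : Nat) : Nat) : Int) by omega]
    rw [ih (m+1) _ (by omega) (by omega)]
    have hdrop : (nlpos cs).drop m = (nlpos cs).getD m 0 :: (nlpos cs).drop (m+1) := by
      rw [List.getD_eq_getElem _ _ (by omega)]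
      exact List.drop_eq_getElem_cons (by omega)
    rw [hdrop]
    simp only [segs, List.append_assoc, List.singleton_append, Nat.add_sub_cancel]

lemma loop2_result (cs : List Char) (h : nlpos cs ≠ []) :
    (PySem.List.pyRange 0 ((((nlpos cs).length : Nat) : Int) + 1) 1).foldl
      (decoALoop2Body cs (nlpos cs).length ((nlpos cs).map Int.ofNat)) []
      = segs cs 0 (nlpos cs) := by
  have hlen : 1 ≤ (nlpos cs).length := List.length_pos_of_ne_nil h
  rw [PySem.List.pyRange_one_cons (by omega), List.foldl_cons]
  have hstep0 : decoALoop2Body cs (nlpos cs).length ((nlpos cs).map Int.ofNat) [] 0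
      = [cs.take ((nlpos cs).getD 0 0)] := by
    unfold decoALoop2Body
    rw [if_pos rfl]
    dsimp only
    have hgd : PySem.List.pyGetD ((nlpos cs).map Int.ofNat) 0 0
        = Int.ofNat ((nlpos cs).getD 0 0) := by
      rw [show (0 : Int) = ((0 : Nat) : Int) from rfl, PySem.List.pyGetD_natCast,
          getD_map_ofNat _ _ _ (by omega)]
    have hq0 : (nlpos cs).getD 0 0 < cs.length := by
      apply nlpos_lt_length cs
      rw [List.getD_eq_getElem _ _ (by omega)]
      exact List.getElem_mem _
    rw [hgd, show (0 : Int) = ((0 : Nat) : Int) from rfl,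
        show Int.ofNat ((nlpos cs).getD 0 0) = (((nlpos cs).getD 0 0 : Nat) : Int) by simp,
        extract_eq cs _ _ (le_of_lt hq0)]
    simp
  rw [hstep0, show (0 : Int) + 1 = ((1 : Nat) : Int) by norm_num,
      loop2_inv cs ((nlpos cs).length - 1) 1 _ le_rfl (by omega)]
  obtain ⟨q, qs, hq⟩ := List.exists_cons_of_ne_nil h
  rw [hq]
  simp [segs]

lemma spacing_even (t : Int) (h : PySem.Int.mod t 2 = 0) :
    PySem.Int.truncdiv t 2 = PySem.Int.floordiv (t+1) 2 ∧
      PySem.Int.truncdiv t 2 = PySem.Int.floordiv t 2 := by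
  obtain ⟨k, hk⟩ := (PySem.Int.mod_eq_zero_iff_dvd t 2).mp h
  subst hk
  rw [PySem.Int.truncdiv, Int.mul_tdiv_cancel_left _ (by norm_num),
      PySem.Int.floordiv_eq_ediv_of_pos (by norm_num),
      PySem.Int.floordiv_eq_ediv_of_pos (by norm_num)]
  omega

lemma spacing_odd (t : Int) (h : ¬ PySem.Int.mod t 2 = 0) :
    PySem.Int.truncdiv (t+1) 2 = PySem.Int.floordiv (t+1) 2 ∧
      PySem.Int.truncdiv (t+1) 2 - 1 = PySem.Int.floordiv t 2 := by
  have hdvd : ¬ (2 : Int) ∣ t := fun hd => h ((PySem.Int.mod_eq_zero_iff_dvd t 2).mpr hd)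
  have hk : t + 1 = 2 * (t / 2 + 1) := by omega
  rw [PySem.Int.truncdiv, hk, Int.mul_tdiv_cancel_left _ (by norm_num),
      PySem.Int.floordiv_eq_ediv_of_pos (by norm_num),
      PySem.Int.floordiv_eq_ediv_of_pos (by norm_num)]
  omega

lemma flatMap_join (F : List Char → List Char) (xs : List (List Char)) (hxs : xs ≠ []) :
    xs.flatMap (fun w => F w ++ ['\n']) = PySem.Chars.join ['\n'] (xs.map F) ++ ['\n'] := by
  induction xs with
  | nil => exact absurd rfl hxs
  | cons x t ih =>
    cases t with
    | nil => simp [PySem.Chars.join_singleton]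
    | cons y s =>
      rw [List.flatMap_cons, ih (by simp),
          show List.map F (x :: y :: s) = F x :: F y :: List.map F s from rfl,
          PySem.Chars.join_cons_cons]
      simp

lemma loop3_body_eq (st : List (List Char)) (max_item ch : List Char) (TL : Int) :
    decoALoop3Body st max_item
        (PySem.List.pyRepeat ch 2 ++ ' ' :: max_item ++ ' ' :: PySem.List.pyRepeat ch 2) ch TL
      = fun out something => out ++
          (decoBLine (PySem.List.pyRepeat ch 2) (PySem.List.pyGetD st something [])
            (decide (PySem.List.pyGetD st something [] = max_item)) TL ++ ['\n']) := by
  funext out something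
  unfold decoALoop3Body decoBLine
  dsimp only
  by_cases hw : PySem.List.pyGetD st something [] = max_item
  · rw [if_neg (by simp [hw]), if_pos (by simp [hw]), hw]
    simp
  · rw [if_pos (by simp [hw])]
    simp only [decide_eq_false hw, Bool.false_eq_true, if_false]
    by_cases hpar : PySem.Int.mod (TL - 6 - PySem.Chars.len (PySem.List.pyGetD st something [])) 2 = 0
    · rw [if_pos hpar]
      obtain ⟨h1, h2⟩ := spacing_even (TL - 6 - PySem.Chars.len (PySem.List.pyGetD st something [])) hpar
      rw [← h1, ← h2]
      simp
    · rw [if_neg hpar]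
      obtain ⟨h1, h2⟩ := spacing_odd (TL - 6 - PySem.Chars.len (PySem.List.pyGetD st something [])) hpar
      rw [← h2, ← h1]
      simp

lemma loop3_result (st : List (List Char)) (max_item ch top : List Char) (TL : Int)
    (hst : st ≠ []) :
    (PySem.List.pyRange 0 ((st.length : Nat) : Int) 1).foldl
      (decoALoop3Body st max_item
        (PySem.List.pyRepeat ch 2 ++ ' ' :: max_item ++ ' ' :: PySem.List.pyRepeat ch 2) ch TL) top
      = top ++ PySem.Chars.join ['\n']
          (st.map (fun w => decoBLine (PySem.List.pyRepeat ch 2) w (decide (w = max_item)) TL))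
          ++ ['\n'] := by
  rw [loop3_body_eq]
  rw [PySem.List.foldl_pyRange_zero_pyGetD' st []
      (fun out word => out ++ (decoBLine (PySem.List.pyRepeat ch 2) word (decide (word = max_item)) TL ++ ['\n'])) top]
  rw [PySem.List.foldl_append_eq_flatMap
      (fun word => decoBLine (PySem.List.pyRepeat ch 2) word (decide (word = max_item)) TL ++ ['\n']) st top]
  rw [flatMap_join _ st hst]
  simp

lemma len_mcl (ch max_item : List Char) :
    PySem.Chars.len (PySem.List.pyRepeat ch 2 ++ ' ' :: max_item ++ ' ' :: PySem.List.pyRepeat ch 2)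
      = 2 * PySem.Chars.len (PySem.List.pyRepeat ch 2) + PySem.Chars.len max_item + 2 := by
  simp [PySem.Chars.len]
  push_cast
  ring

lemma style3_eq (cs ch : List Char) (h : '\n' ∈ cs) : decoAStyle3 cs ch = decoBStyle3 cs ch := by
  have hQne : nlpos cs ≠ [] := by
    obtain ⟨i, hi, hc⟩ := List.mem_iff_getElem.mp h
    intro hemp
    have hmem : i ∈ nlpos cs := (mem_nlpos cs i).mpr (by rw [List.getElem?_eq_getElem hi, hc])
    rw [hemp] at hmem
    exact absurd hmem (List.not_mem_nil)
  have hlines : PySem.Chars.splitOn cs ['\n'] ≠ [] := by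
    rw [splitOn_single]
    unfold List.splitOn
    exact List.splitOnP_ne_nil _ cs
  unfold decoAStyle3 decoBStyle3
  dsimp only
  rw [count_single, ← nlpos_length, loop1_result cs hQne, loop2_result cs hQne,
      ← splitOn_eq_segs, ← splitOn_single]
  rw [len_mcl]
  rw [loop3_result _ _ _ _ _ (by
    intro hemp
    apply hlines
    have : (PySem.Chars.splitOn cs ['\n']).length = 0 := by rw [hemp]; rfl
    exact List.eq_nil_of_length_eq_zero this)]
  simp

-- ===== VERDICT (by name: the statement is the Claim_ definition above) =====
theorem decorate_print_spec : Claim_equal_decorate_print := by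
  intro text char style _ hpre
  unfold Spec_decorate_print decorate_print decorate_print_alt
  by_cases h1 : style = 1
  · simp [h1]
  · by_cases h2 : style = 2
    · simp [h1, h2]
    · by_cases h3 : style = 3
      · simp only [h1, h2, h3, if_false, if_true, if_neg, if_pos]
        rw [style3_eq _ _ (hpre h3)]
      · simp [h1, h2, h3]
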